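-- pv_equiv track=rewrite | github.com/AP-MI-2021/lab-3-Andrachereji | main.py | get_longest_all_even
-- ===== SOURCE A (Python) =====
-- def get_longest_all_even(lst:list[int]):
--     '''
--     Determina cea mai lunga subsecventa cu toate numerele pare
--     :param lst:lista in care se cauta subsecventa
--     :return:subsecventa gasita
--     '''
--     n=len(lst)
--     result=[]
--     for st in range(n):
--         for dr in range(st,n):
--             all_even=True
--             for num in lst[st:dr+1]:
--                 if num % 2 != 0:
--                     all_even=False
--                     break
--             if all_even:
--                 if dr-st+1>len(result):
--                     result=lst[st:dr+1]
--     return result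
-- ===== SOURCE B (Python) =====
-- def get_longest_all_even(lst):
--     '''
--     Determina cea mai lunga subsecventa cu toate numerele pare
--     :param lst:lista in care se cauta subsecventa
--     :return:subsecventa gasita
--     '''
--     best = []
--     cur = []
--     for x in lst:
--         if x % 2 == 0:
--             cur.append(x)
--         else:
--             if len(cur) > len(best):
--                 best = cur
--             cur = []
--     return cur if len(cur) > len(best) else best
-- ===== Notes on version B (the rewrite author's own statement) =====
-- stated objective: faster
-- what changed: replaces the triple nested loop over all (start,end) slices with a single pass that accumulates the current even run and keeps the first strictly-longer run
import Mathlib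
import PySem

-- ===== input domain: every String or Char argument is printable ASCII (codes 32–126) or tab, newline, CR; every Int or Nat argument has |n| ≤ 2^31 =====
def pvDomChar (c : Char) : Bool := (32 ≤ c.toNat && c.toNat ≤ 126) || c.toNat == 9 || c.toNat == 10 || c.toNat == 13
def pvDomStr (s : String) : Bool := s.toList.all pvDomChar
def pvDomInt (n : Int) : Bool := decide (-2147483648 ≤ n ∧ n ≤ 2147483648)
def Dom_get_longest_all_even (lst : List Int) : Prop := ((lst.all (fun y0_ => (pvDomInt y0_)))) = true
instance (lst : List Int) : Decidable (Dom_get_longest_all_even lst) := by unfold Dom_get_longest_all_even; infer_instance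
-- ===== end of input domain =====

-- B replaces A's triple nested loop over all (start,end) slices with a single pass that
-- accumulates the current even run and keeps the first strictly-longer run (objective: faster).

-- ===== PORT A =====
-- the Python 'break' after setting all_even=False only exits early; the remaining
-- iterations never change all_even again, so the breakless fold computes the same value
def get_longest_all_even (lst : List Int) : List Int :=
  let n : Int := (lst.length : Int)
  (PySem.List.pyRange 0 n 1).foldl (fun result st =>
    (PySem.List.pyRange st n 1).foldl (fun result dr =>
      let all_even :=
        (PySem.List.slice lst (some st) (some (dr + 1))).foldl
          (fun all_even num => if PySem.Int.mod num 2 ≠ 0 then false else all_even) true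
      if all_even then
        (if dr - st + 1 > (result.length : Int) then
          PySem.List.slice lst (some st) (some (dr + 1))
        else result)
      else result) result) []

-- ===== PORT B =====
def get_longest_all_even_alt (lst : List Int) : List Int :=
  let s :=
    lst.foldl (fun (bc : List Int × List Int) x =>
      if PySem.Int.mod x 2 = 0 then (bc.1, bc.2 ++ [x])
      else ((if (bc.2.length : Int) > (bc.1.length : Int) then bc.2 else bc.1), []))
      ([], [])
  if (s.2.length : Int) > (s.1.length : Int) then s.2 else s.1

-- ===== PRECONDITION & SPEC =====
def Spec_get_longest_all_even (lst : List Int) (out : List Int) : Prop := out = get_longest_all_even_alt lst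
instance (lst : List Int) (out : List Int) : Decidable (Spec_get_longest_all_even lst out) := by unfold Spec_get_longest_all_even; infer_instance

-- ===== CLAIM (what is proved, stated in full; the proofs are below) =====
def Claim_equal_get_longest_all_even : Prop := ∀ (lst : List Int), Dom_get_longest_all_even lst → Spec_get_longest_all_even lst (get_longest_all_even lst)

-- ===== LEMMAS AND PROOFS =====

def pvEven (x : Int) : Bool := PySem.Int.mod x 2 == 0

-- longest all-even prefix
def pvPref : List Int → List Int
  | [] => []
  | x :: xs => if pvEven x then x :: pvPref xs else []

def pvStep (suf r : List Int) : List Int :=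
  if (pvPref suf).length > r.length then pvPref suf else r

-- reference function: fold pvStep over all suffixes, left to right
def pvG : List Int → List Int → List Int
  | [], acc => acc
  | x :: xs, acc => pvG xs (pvStep (x :: xs) acc)

theorem pvEven_true_of (x : Int) (hx : PySem.Int.mod x 2 = 0) : pvEven x = true := by
  unfold pvEven; rw [hx]; rfl

theorem pvEven_false_of (x : Int) (hx : ¬ PySem.Int.mod x 2 = 0) : pvEven x = false := by
  unfold pvEven; simp only [beq_eq_false_iff_ne, ne_eq]; exact hx

theorem pvPref_length_le (l : List Int) : (pvPref l).length ≤ l.length := by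
  induction l with
  | nil => simp [pvPref]
  | cons x xs ih => simp only [pvPref]; split <;> simp; omega

theorem pvPref_take (l : List Int) : l.take (pvPref l).length = pvPref l := by
  induction l with
  | nil => simp [pvPref]
  | cons x xs ih => simp only [pvPref]; split <;> simp [ih]

theorem pvAll_take_iff (l : List Int) (j : Nat) :
    (l.take j).all pvEven = true ↔ min j l.length ≤ (pvPref l).length := by
  induction l generalizing j with
  | nil => simp
  | cons x xs ih =>
    cases j with
    | zero => simp
    | succ j =>
      simp only [List.take_succ_cons, List.all_cons, Bool.and_eq_true, pvPref, List.length_cons]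
      by_cases hx : pvEven x = true
      · simp [hx, ih j]
      · simp [hx]

theorem pvAllEven_fold (l : List Int) (b : Bool) :
    l.foldl (fun a num => if PySem.Int.mod num 2 ≠ 0 then false else a) b = (b && l.all pvEven) := by
  induction l generalizing b with
  | nil => simp
  | cons x xs ih =>
    simp only [List.foldl_cons, List.all_cons]
    by_cases hx : PySem.Int.mod x 2 = 0
    · rw [if_neg (fun h => h hx)]
      rw [ih, pvEven_true_of x hx]
      simp
    · rw [if_pos hx]
      rw [ih, pvEven_false_of x hx]
      simp

-- the inner dr-loop of A, in Nat form
theorem pvInnerNat (suf : List Int) (m : Nat) (hm : m ≤ suf.length) (r : List Int) :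
    (List.range m).foldl
      (fun r k =>
        if (suf.take (k + 1)).all pvEven then
          (if ((k : Int) + 1 > (r.length : Int)) then suf.take (k + 1) else r)
        else r) r
    = (if min m (pvPref suf).length > r.length then suf.take (min m (pvPref suf).length) else r) := by
  induction m with
  | zero => simp
  | succ m ih =>
    rw [List.range_succ, List.foldl_append]
    rw [ih (by omega)]
    simp only [List.foldl_cons, List.foldl_nil]
    have hP := pvPref_length_le suf
    by_cases hall : (suf.take (m + 1)).all pvEven = true
    · have hle : m + 1 ≤ (pvPref suf).length := by
        have := (pvAll_take_iff suf (m + 1)).mp hall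
        omega
      rw [if_pos hall]
      have hmin : min m (pvPref suf).length = m := by omega
      have hmin' : min (m + 1) (pvPref suf).length = m + 1 := by omega
      rw [hmin, hmin']
      have hlen : (suf.take (m + 1)).length = m + 1 := by
        rw [List.length_take]; omega
      by_cases h1 : m > r.length
      · rw [if_pos h1]
        have hlen' : (suf.take m).length = m := by rw [List.length_take]; omega
        rw [if_pos (by rw [hlen']; exact_mod_cast by omega)]
        rw [if_pos (by omega)]
      · rw [if_neg h1]
        by_cases h2 : m + 1 > r.length
        · rw [if_pos (by exact_mod_cast by omega)]
          rw [if_pos (by omega)]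
        · rw [if_neg (by exact_mod_cast by omega)]
          rw [if_neg (by omega)]
    · have hgt : (pvPref suf).length < m + 1 := by
        by_contra h
        exact hall ((pvAll_take_iff suf (m + 1)).mpr (by omega))
      rw [if_neg hall]
      have hmin : min m (pvPref suf).length = min (m + 1) (pvPref suf).length := by omega
      rw [hmin]

-- the inner dr-loop of A equals pvStep on the suffix
theorem pvInner (lst : List Int) (s : Nat) (r : List Int) :
    (PySem.List.pyRange (s : Int) (lst.length : Int) 1).foldl
      (fun result dr =>
        let all_even :=
          (PySem.List.slice lst (some (s : Int)) (some (dr + 1))).foldl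
            (fun all_even num => if PySem.Int.mod num 2 ≠ 0 then false else all_even) true
        if all_even then
          (if dr - (s : Int) + 1 > (result.length : Int) then
            PySem.List.slice lst (some (s : Int)) (some (dr + 1))
          else result)
        else result) r
    = pvStep (lst.drop s) r := by
  rw [PySem.List.pyRange_one, List.foldl_map]
  have hbody : (fun (result : List Int) (k : Nat) =>
      let dr := (s : Int) + (k : Int)
      let all_even :=
        (PySem.List.slice lst (some (s : Int)) (some (dr + 1))).foldl
          (fun all_even num => if PySem.Int.mod num 2 ≠ 0 then false else all_even) true
      if all_even then
        (if dr - (s : Int) + 1 > (result.length : Int) then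
          PySem.List.slice lst (some (s : Int)) (some (dr + 1))
        else result)
      else result)
    = (fun (r : List Int) (k : Nat) =>
        if ((lst.drop s).take (k + 1)).all pvEven then
          (if ((k : Int) + 1 > (r.length : Int)) then (lst.drop s).take (k + 1) else r)
        else r) := by
    funext r k
    have hslice : PySem.List.slice lst (some (s : Int)) (some ((s : Int) + (k : Int) + 1))
        = (lst.drop s).take (k + 1) := by
      have : (s : Int) + (k : Int) + 1 = (s : Int) + ((k + 1 : Nat) : Int) := by push_cast; ring
      rw [this, PySem.List.slice_natCast_add]
    simp only [hslice, pvAllEven_fold, Bool.true_and]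
    have harith : (s : Int) + (k : Int) - (s : Int) + 1 = (k : Int) + 1 := by ring
    rw [harith]
  rw [hbody]
  have hcnt : ((lst.length : Int) - (s : Int)).toNat = (lst.drop s).length := by
    rw [List.length_drop]; omega
  rw [hcnt]
  rw [pvInnerNat (lst.drop s) (lst.drop s).length (le_refl _) r]
  have : min (lst.drop s).length (pvPref (lst.drop s)).length = (pvPref (lst.drop s)).length := by
    have := pvPref_length_le (lst.drop s)
    omega
  rw [this, pvPref_take]
  rfl

theorem pvOuterNat (lst : List Int) (acc : List Int) :
    (List.range lst.length).foldl (fun r s => pvStep (lst.drop s) r) acc = pvG lst acc := by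
  induction lst generalizing acc with
  | nil => simp [pvG]
  | cons x xs ih =>
    rw [List.length_cons, List.range_succ_eq_map, List.foldl_cons, List.foldl_map]
    simp only [List.drop_zero, List.drop_succ_cons]
    exact ih _

theorem pvA_eq_pvG (lst : List Int) : get_longest_all_even lst = pvG lst [] := by
  simp only [get_longest_all_even]
  rw [PySem.List.pyRange_one]
  have h0 : ((lst.length : Int) - 0).toNat = lst.length := by omega
  rw [h0, List.foldl_map]
  have hbody : (fun (r : List Int) (s : Nat) =>
      (PySem.List.pyRange ((0 : Int) + (s : Int)) (lst.length : Int) 1).foldl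
        (fun result dr =>
          let all_even :=
            (PySem.List.slice lst (some ((0 : Int) + (s : Int))) (some (dr + 1))).foldl
              (fun all_even num => if PySem.Int.mod num 2 ≠ 0 then false else all_even) true
          if all_even then
            (if dr - ((0 : Int) + (s : Int)) + 1 > (result.length : Int) then
              PySem.List.slice lst (some ((0 : Int) + (s : Int))) (some (dr + 1))
            else result)
          else result) r)
      = (fun (r : List Int) (s : Nat) => pvStep (lst.drop s) r) := by
    funext r s
    have hz : (0 : Int) + (s : Int) = (s : Int) := by ring
    rw [hz]
    exact pvInner lst s r
  rw [hbody]
  exact pvOuterNat lst []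

-- B side
theorem pvPref_of_allEven (l : List Int) (h : l.all pvEven = true) : pvPref l = l := by
  induction l with
  | nil => rfl
  | cons x xs ih =>
    simp only [List.all_cons, Bool.and_eq_true] at h
    simp [pvPref, h.1, ih h.2]

theorem pvG_allEven (cur best : List Int) (h : cur.all pvEven = true) :
    pvG cur best = (if cur.length > best.length then cur else best) := by
  induction cur generalizing best with
  | nil => simp [pvG]
  | cons x xs ih =>
    simp only [List.all_cons, Bool.and_eq_true] at h
    rw [pvG, pvStep, pvPref_of_allEven _ (by simp [h.1, h.2])]
    rw [ih _ h.2]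
    by_cases hb : (x :: xs).length > best.length
    · rw [if_pos hb, if_neg (by simp)]
    · rw [if_neg hb, if_neg (by simp only [List.length_cons] at hb; omega)]

theorem pvPref_append_odd (cs : List Int) (x : Int) (xs : List Int)
    (hcs : cs.all pvEven = true) (hx : pvEven x = false) :
    pvPref (cs ++ x :: xs) = cs := by
  induction cs with
  | nil => simp [pvPref, hx]
  | cons c cs ih =>
    simp only [List.all_cons, Bool.and_eq_true] at hcs
    simp [pvPref, hcs.1, ih hcs.2]

theorem pvG_append_odd (cur : List Int) (x : Int) (xs : List Int) (best : List Int)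
    (hcur : cur.all pvEven = true) (hx : pvEven x = false) :
    pvG (cur ++ x :: xs) best = pvG xs (if cur.length > best.length then cur else best) := by
  induction cur generalizing best with
  | nil =>
    simp only [List.nil_append, pvG, pvStep, pvPref, hx]
    rw [if_neg (by simp), if_neg (by simp)]
  | cons c cs ih =>
    simp only [List.all_cons, Bool.and_eq_true] at hcur
    rw [List.cons_append, pvG, pvStep]
    have hp : pvPref (c :: (cs ++ x :: xs)) = c :: cs := by
      simp [pvPref, hcur.1, pvPref_append_odd cs x xs hcur.2 hx]
    rw [hp]
    rw [ih _ hcur.2]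
    congr 1
    by_cases hb : (c :: cs).length > best.length
    · rw [if_pos hb, if_neg (by simp)]
    · rw [if_neg hb, if_neg (by simp only [List.length_cons] at hb; omega)]

theorem pvB_fold (l : List Int) (best cur : List Int) (hcur : cur.all pvEven = true) :
    (let s := l.foldl (fun (bc : List Int × List Int) x =>
        if PySem.Int.mod x 2 = 0 then (bc.1, bc.2 ++ [x])
        else ((if (bc.2.length : Int) > (bc.1.length : Int) then bc.2 else bc.1), []))
        (best, cur);
      if (s.2.length : Int) > (s.1.length : Int) then s.2 else s.1)
    = pvG (cur ++ l) best := by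
  induction l generalizing best cur with
  | nil =>
    simp only [List.foldl_nil, List.append_nil]
    rw [pvG_allEven cur best hcur]
    by_cases hb : cur.length > best.length
    · rw [if_pos (by exact_mod_cast hb), if_pos hb]
    · rw [if_neg (by exact_mod_cast hb), if_neg hb]
  | cons x l ih =>
    simp only [List.foldl_cons]
    by_cases hx : PySem.Int.mod x 2 = 0
    · rw [if_pos hx]
      have := ih best (cur ++ [x]) (by simp [List.all_append, hcur, pvEven_true_of x hx])
      simp only at this
      rw [this, List.append_assoc]
      rfl
    · rw [if_neg hx]
      have hxe : pvEven x = false := pvEven_false_of x hx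
      have := ih (if (cur.length : Int) > (best.length : Int) then cur else best) [] (by simp)
      simp only at this
      rw [this, List.nil_append]
      rw [pvG_append_odd cur x l best hcur hxe]
      congr 1
      by_cases hb : cur.length > best.length
      · rw [if_pos (by exact_mod_cast hb), if_pos hb]
      · rw [if_neg (by exact_mod_cast hb), if_neg hb]

theorem pvB_eq_pvG (lst : List Int) : get_longest_all_even_alt lst = pvG lst [] := by
  unfold get_longest_all_even_alt
  have := pvB_fold lst [] [] (by simp)
  simp only at this
  rw [this, List.nil_append]

-- ===== VERDICT (by name: the statement is the Claim_ definition above) =====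
theorem get_longest_all_even_spec : Claim_equal_get_longest_all_even := by
  intro lst _
  unfold Spec_get_longest_all_even
  rw [pvA_eq_pvG, pvB_eq_pvG]
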